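-- pv_equiv track=rewrite | github.com/openmednlp/bedrock | bedrock/process.py | index_tokenized_sentences
-- ===== SOURCE A (Python) =====
-- def index_tokenized_sentences(tokenized_sentences):
--     # TODO: There is already a function that can do this, should be replaced
--     word_dict = dict()
--     x = []
--     i = 0
--     for tokenized_sentence in tokenized_sentences:
--         indexed_sentence = []
--         for word in tokenized_sentence:
--             if word not in word_dict:
--                 i += 1
--                 word_dict[word] = i
--             indexed_sentence.append(word_dict[word])
--         x.append(indexed_sentence)
--     return x, word_dict
-- ===== SOURCE B (Python) =====
-- def index_tokenized_sentences(tokenized_sentences):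
--     # Pass 1: build the full vocabulary in first-appearance order (indices from 1).
--     word_dict = {}
--     for sentence in tokenized_sentences:
--         for word in sentence:
--             if word not in word_dict:
--                 word_dict[word] = len(word_dict) + 1
--     # Pass 2: map every sentence through the completed table.
--     x = [[word_dict[word] for word in sentence] for sentence in tokenized_sentences]
--     return x, word_dict
-- ===== Notes on version B (the rewrite author's own statement) =====
-- stated objective: alternative
-- what changed: B splits A's single fused traversal into a vocabulary-building first pass (index = current dict size + 1, no running counter) followed by a separate lookup pass that maps each sentence through the completed dict, instead of A's interleaved insert-and-append loop.
import Mathlib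
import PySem

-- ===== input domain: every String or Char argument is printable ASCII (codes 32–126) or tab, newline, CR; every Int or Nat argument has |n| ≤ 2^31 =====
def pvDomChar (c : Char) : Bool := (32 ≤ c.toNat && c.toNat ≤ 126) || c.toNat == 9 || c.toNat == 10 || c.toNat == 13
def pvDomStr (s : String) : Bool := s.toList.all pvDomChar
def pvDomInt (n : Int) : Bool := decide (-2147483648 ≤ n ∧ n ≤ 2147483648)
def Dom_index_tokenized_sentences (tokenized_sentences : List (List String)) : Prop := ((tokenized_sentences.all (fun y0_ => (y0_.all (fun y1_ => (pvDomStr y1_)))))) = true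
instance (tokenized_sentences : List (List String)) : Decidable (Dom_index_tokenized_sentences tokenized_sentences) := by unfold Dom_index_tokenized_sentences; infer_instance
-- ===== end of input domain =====

-- B replaces A's single fused traversal (insert-and-append with a running counter) by a
-- vocabulary-building first pass (index = dict size + 1) followed by a separate lookup pass;
-- same cost, different decomposition (objective: alternative).

-- ===== PORT A =====
-- A: one fused loop, state = (x, word_dict, i); a word is inserted with counter i+1 the
-- moment it is first met, and the lookup is done in the dict as it stands at that moment.
def pvStepWordA (st2 : List Int × PySem.Dict String Int × Int) (word : String) :
    List Int × PySem.Dict String Int × Int :=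
  let di := if st2.2.1.contains word then (st2.2.1, st2.2.2)
            else (st2.2.1.insert word (st2.2.2 + 1), st2.2.2 + 1)
  (st2.1 ++ [di.1.getD word 0], di.1, di.2)

def pvStepSentA (st : List (List Int) × PySem.Dict String Int × Int) (tokenized_sentence : List String) :
    List (List Int) × PySem.Dict String Int × Int :=
  let inner := tokenized_sentence.foldl pvStepWordA ([], st.2.1, st.2.2)
  (st.1 ++ [inner.1], inner.2.1, inner.2.2)

def index_tokenized_sentences (tokenized_sentences : List (List String)) : List (List Int) × (List (String × Int)) :=
  ((tokenized_sentences.foldl pvStepSentA ([], PySem.Dict.empty, 0)).1,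
   (tokenized_sentences.foldl pvStepSentA ([], PySem.Dict.empty, 0)).2.1.items)

-- ===== PORT B =====
-- B: pass 1 builds the complete vocabulary (no counter: index = current size + 1),
-- pass 2 maps every sentence through the finished table.
def pvStepWordB (d : PySem.Dict String Int) (word : String) : PySem.Dict String Int :=
  if d.contains word then d else d.insert word ((d.size : Int) + 1)

def pvStepSentB (d : PySem.Dict String Int) (sentence : List String) : PySem.Dict String Int :=
  sentence.foldl pvStepWordB d

def index_tokenized_sentences_alt (tokenized_sentences : List (List String)) : List (List Int) × (List (String × Int)) :=
  (tokenized_sentences.map (fun sentence =>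
      sentence.map (fun word => (tokenized_sentences.foldl pvStepSentB PySem.Dict.empty).getD word 0)),
   (tokenized_sentences.foldl pvStepSentB PySem.Dict.empty).items)

-- ===== PRECONDITION & SPEC =====
def Spec_index_tokenized_sentences (tokenized_sentences : List (List String)) (out : List (List Int) × (List (String × Int))) : Prop := out = index_tokenized_sentences_alt tokenized_sentences
instance (tokenized_sentences : List (List String)) (out : List (List Int) × (List (String × Int))) : Decidable (Spec_index_tokenized_sentences tokenized_sentences out) := by unfold Spec_index_tokenized_sentences; infer_instance

-- ===== CLAIM (what is proved, stated in full; the proofs are below) =====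
def Claim_equal_index_tokenized_sentences : Prop := ∀ (tokenized_sentences : List (List String)), Dom_index_tokenized_sentences tokenized_sentences → Spec_index_tokenized_sentences tokenized_sentences (index_tokenized_sentences tokenized_sentences)

-- ===== LEMMAS AND PROOFS =====

-- B's word step never changes an existing binding.
theorem pvStepWordB_get?_mono (d : PySem.Dict String Int) (w k : String) (v : Int)
    (h : d.get? k = some v) : (pvStepWordB d w).get? k = some v := by
  unfold pvStepWordB
  split
  · exact h
  · rename_i hc
    rw [PySem.Dict.get?_insert]
    split
    · rename_i hk; subst hk
      rw [PySem.Dict.contains_eq_isSome_get?, h] at hc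
      simp at hc
    · exact h

theorem pvFoldl_get?_mono (s : List String) : ∀ (d : PySem.Dict String Int) (k : String) (v : Int),
    d.get? k = some v → (pvStepSentB d s).get? k = some v := by
  induction s with
  | nil => intro d k v h; exact h
  | cons w s ih =>
    intro d k v h
    exact ih (pvStepWordB d w) k v (pvStepWordB_get?_mono d w k v h)

theorem pvFoldlS_get?_mono (ss : List (List String)) : ∀ (d : PySem.Dict String Int) (k : String) (v : Int),
    d.get? k = some v → (ss.foldl pvStepSentB d).get? k = some v := by
  induction ss with
  | nil => intro d k v h; exact h
  | cons s ss ih =>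
    intro d k v h
    exact ih (pvStepSentB d s) k v (pvFoldl_get?_mono s d k v h)

-- after pvStepWordB d w, w is bound.
theorem pvStepWordB_get?_self (d : PySem.Dict String Int) (w : String) :
    ∃ v, (pvStepWordB d w).get? w = some v := by
  unfold pvStepWordB
  split
  · rename_i hc
    rw [PySem.Dict.contains_eq_isSome_get?] at hc
    exact Option.isSome_iff_exists.mp hc
  · exact ⟨_, PySem.Dict.get?_insert_self d w _⟩

-- A's inner loop, started with counter = size, walks B's pvStepWordB on the dict component,
-- keeps counter = size, and appends the FINAL dict's value for each word.
theorem pvInner (dF : PySem.Dict String Int) (s : List String) :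
    ∀ (acc : List Int) (d : PySem.Dict String Int),
    (∀ k v, (pvStepSentB d s).get? k = some v → dF.get? k = some v) →
    s.foldl pvStepWordA (acc, d, (d.size : Int))
    = (acc ++ s.map (fun w => dF.getD w 0), pvStepSentB d s, ((pvStepSentB d s).size : Int)) := by
  induction s with
  | nil => intro acc d _; simp [pvStepSentB]
  | cons w s ih =>
    intro acc d hmono
    have hstepS : pvStepSentB d (w :: s) = pvStepSentB (pvStepWordB d w) s := rfl
    have hsize : ((pvStepWordB d w).size : Int)
        = if d.contains w then (d.size : Int) else (d.size : Int) + 1 := by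
      unfold pvStepWordB
      split <;> simp [PySem.Dict.size_insert, *]
    have hval : (pvStepWordB d w).getD w 0 = dF.getD w 0 := by
      obtain ⟨v, hv⟩ := pvStepWordB_get?_self d w
      have h2 : (pvStepSentB (pvStepWordB d w) s).get? w = some v := pvFoldl_get?_mono s _ w v hv
      have h3 : dF.get? w = some v := hmono w v (by rw [hstepS]; exact h2)
      rw [PySem.Dict.getD_eq_get?_getD, PySem.Dict.getD_eq_get?_getD, hv, h3]
    have hstep1 : pvStepWordA (acc, d, (d.size : Int)) w
        = (acc ++ [dF.getD w 0], pvStepWordB d w, ((pvStepWordB d w).size : Int)) := by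
      simp only [pvStepWordA]
      by_cases hc : d.contains w
      · simp only [pvStepWordB, hc, if_true] at hval hsize ⊢
        simp [hval]
      · simp only [pvStepWordB, hc, if_false, Bool.false_eq_true] at hval hsize ⊢
        simp [hval, hsize]
    rw [List.foldl_cons, hstep1,
        ih (acc ++ [dF.getD w 0]) (pvStepWordB d w)
          (by intro k v h; exact hmono k v (by rw [hstepS]; exact h))]
    simp [hstepS]

-- A's outer loop, same shape one level up.
theorem pvOuter (dF : PySem.Dict String Int) (ss : List (List String)) :
    ∀ (accx : List (List Int)) (d : PySem.Dict String Int),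
    (∀ k v, (ss.foldl pvStepSentB d).get? k = some v → dF.get? k = some v) →
    ss.foldl pvStepSentA (accx, d, (d.size : Int))
    = (accx ++ ss.map (fun s => s.map (fun w => dF.getD w 0)),
       ss.foldl pvStepSentB d, ((ss.foldl pvStepSentB d).size : Int)) := by
  induction ss with
  | nil => intro accx d _; simp
  | cons s ss ih =>
    intro accx d hmono
    have hin := pvInner dF s [] d
      (fun k v h => hmono k v (pvFoldlS_get?_mono ss (pvStepSentB d s) k v h))
    rw [List.foldl_cons, show pvStepSentA (accx, d, (d.size : Int)) s
          = (accx ++ [s.map (fun w => dF.getD w 0)], pvStepSentB d s, ((pvStepSentB d s).size : Int)) by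
        simp only [pvStepSentA, hin]; simp,
        ih (accx ++ [s.map (fun w => dF.getD w 0)]) (pvStepSentB d s)
          (fun k v h => hmono k v h)]
    simp

theorem pvEmpty_size : (((PySem.Dict.empty : PySem.Dict String Int).size : Int)) = 0 := by
  simp [PySem.Dict.size, PySem.Dict.empty]

-- ===== VERDICT (by name: the statement is the Claim_ definition above) =====
theorem index_tokenized_sentences_spec : Claim_equal_index_tokenized_sentences := by
  intro ts _
  unfold Spec_index_tokenized_sentences index_tokenized_sentences index_tokenized_sentences_alt
  have h := pvOuter (ts.foldl pvStepSentB PySem.Dict.empty) ts [] PySem.Dict.empty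
    (fun k v h => h)
  rw [pvEmpty_size] at h
  rw [h]
  simp
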